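-- pv_equiv track=rewrite | github.com/keniferAma/retos-de-programacion | donde_esta_el_robot.py | calcular_posicion_robot
-- ===== SOURCE A (Python) =====
-- def calcular_posicion_robot(pasos):
--     # Inicializamos las coordenadas del robot
--     x, y = 0, 0
--     # Inicializamos la dirección en la que está mirando el robot
--     direccion = 0  # 0: arriba, 1: izquierda, 2: abajo, 3: derecha
--
--     for paso in pasos:
--         if direccion == 0:
--             y += paso
--         elif direccion == 1:
--             x -= paso
--         elif direccion == 2:
--             y -= paso
--         elif direccion == 3:
--             x += paso
--
--         # El robot gira 90 grados en sentido contrario a las agujas del reloj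
--         direccion = (direccion + 1) % 4
--
--     return x, y
-- ===== SOURCE B (Python) =====
-- def calcular_posicion_robot(pasos):
--     pasos = list(pasos)
--     y = sum(p for i, p in enumerate(pasos) if i % 4 == 0) - sum(p for i, p in enumerate(pasos) if i % 4 == 2)
--     x = sum(p for i, p in enumerate(pasos) if i % 4 == 3) - sum(p for i, p in enumerate(pasos) if i % 4 == 1)
--     return (x, y)
-- ===== Notes on version B (the rewrite author's own statement) =====
-- stated objective: simpler
-- what changed: Replaces the step-by-step direction state machine with direct sums of steps grouped by index modulo 4 (index 0 mod 4 moves +y, 1 moves -x, 2 moves -y, 3 moves +x).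
import Mathlib
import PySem

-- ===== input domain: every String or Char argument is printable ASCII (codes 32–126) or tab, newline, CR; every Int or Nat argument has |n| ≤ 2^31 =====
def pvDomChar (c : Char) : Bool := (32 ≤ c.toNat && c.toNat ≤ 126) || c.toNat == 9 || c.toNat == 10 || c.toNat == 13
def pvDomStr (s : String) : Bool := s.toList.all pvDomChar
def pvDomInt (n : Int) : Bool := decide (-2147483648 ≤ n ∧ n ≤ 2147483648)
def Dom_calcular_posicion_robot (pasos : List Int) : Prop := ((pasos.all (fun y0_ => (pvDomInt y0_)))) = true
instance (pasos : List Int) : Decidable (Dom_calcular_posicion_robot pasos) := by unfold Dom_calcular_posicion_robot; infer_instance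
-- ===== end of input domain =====

-- B replaces A's direction state machine by summing steps grouped by index mod 4 (same cost; objective: simpler).

-- ===== PORT A =====
-- Port of A: fold over the steps carrying (x, y, direccion); direccion cycles 0→1→2→3→0.
def calcular_posicion_robot (pasos : List Int) : Int × Int :=
  let s := pasos.foldl (fun (st : Int × Int × Int) paso =>
    let x := st.1
    let y := st.2.1
    let d := st.2.2
    let xy : Int × Int :=
      if d = 0 then (x, y + paso)
      else if d = 1 then (x - paso, y)
      else if d = 2 then (x, y - paso)
      else if d = 3 then (x + paso, y)
      else (x, y)
    (xy.1, xy.2, PySem.Int.mod (d + 1) 4)) (0, 0, 0)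
  (s.1, s.2.1)

-- ===== PORT B =====
-- sum(p for i, p in enumerate(pasos) if i % 4 == t)
def pvSumSel (pasos : List Int) (t : Int) : Int :=
  (((PySem.List.enumerate pasos).filter (fun p => PySem.Int.mod p.1 4 == t)).map (fun p => p.2)).sum

-- Port of B: steps grouped by index mod 4; no direction state.
def calcular_posicion_robot_alt (pasos : List Int) : Int × Int :=
  let y := pvSumSel pasos 0 - pvSumSel pasos 2
  let x := pvSumSel pasos 3 - pvSumSel pasos 1
  (x, y)

-- ===== PRECONDITION & SPEC =====
def Spec_calcular_posicion_robot (pasos : List Int) (out : Int × Int) : Prop := out = calcular_posicion_robot_alt pasos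
instance (pasos : List Int) (out : Int × Int) : Decidable (Spec_calcular_posicion_robot pasos out) := by unfold Spec_calcular_posicion_robot; infer_instance

-- ===== CLAIM (what is proved, stated in full; the proofs are below) =====
def Claim_equal_calcular_posicion_robot : Prop := ∀ (pasos : List Int), Dom_calcular_posicion_robot pasos → Spec_calcular_posicion_robot pasos (calcular_posicion_robot pasos)

-- ===== LEMMAS AND PROOFS =====

-- pvSumSel over an enumerate starting at offset n
def pvGSel (pasos : List Int) (n : Nat) (t : Int) : Int :=
  (((PySem.List.enumerate pasos n).filter (fun p => PySem.Int.mod p.1 4 == t)).map (fun p => p.2)).sum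

theorem pvGSel_nil (n : Nat) (t : Int) : pvGSel [] n t = 0 := by
  simp [pvGSel, PySem.List.enumerate]

theorem pvGSel_cons (p : Int) (r : List Int) (n : Nat) (t : Int) :
    pvGSel (p :: r) n t = (if ((n : Int) % 4 = t) then p else 0) + pvGSel r (n + 1) t := by
  have hm : PySem.Int.mod (n : Int) 4 = (n : Int) % 4 :=
    PySem.Int.mod_eq_emod_of_pos (by norm_num)
  simp only [pvGSel, PySem.List.enumerate_cons, List.filter_cons]
  push_cast
  rw [hm]
  by_cases h : ((n : Int) % 4 = t)
  · simp [h]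
  · simp [h]

theorem pv_loop_eq : ∀ (pasos : List Int) (n : Nat) (x y : Int),
    pasos.foldl (fun (st : Int × Int × Int) paso =>
      let x := st.1
      let y := st.2.1
      let d := st.2.2
      let xy : Int × Int :=
        if d = 0 then (x, y + paso)
        else if d = 1 then (x - paso, y)
        else if d = 2 then (x, y - paso)
        else if d = 3 then (x + paso, y)
        else (x, y)
      (xy.1, xy.2, PySem.Int.mod (d + 1) 4)) (x, y, (n : Int) % 4) =
    (x + (pvGSel pasos n 3 - pvGSel pasos n 1),
     y + (pvGSel pasos n 0 - pvGSel pasos n 2),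
     ((n + pasos.length : Nat) : Int) % 4) := by
  intro pasos
  induction pasos with
  | nil => intro n x y; simp [pvGSel_nil]
  | cons p r ih =>
    intro n x y
    have hmod4 : ∀ m : Int, PySem.Int.mod m 4 = m % 4 := fun m =>
      PySem.Int.mod_eq_emod_of_pos (by norm_num)
    have h4 : (n : Int) % 4 = 0 ∨ (n : Int) % 4 = 1 ∨ (n : Int) % 4 = 2 ∨ (n : Int) % 4 = 3 := by
      omega
    rw [List.foldl_cons]
    rcases h4 with h | h | h | h
    · have hstep : ((fun (st : Int × Int × Int) paso =>
          let x := st.1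
          let y := st.2.1
          let d := st.2.2
          let xy : Int × Int :=
            if d = 0 then (x, y + paso)
            else if d = 1 then (x - paso, y)
            else if d = 2 then (x, y - paso)
            else if d = 3 then (x + paso, y)
            else (x, y)
          (xy.1, xy.2, PySem.Int.mod (d + 1) 4)) (x, y, (n : Int) % 4) p)
          = (x, y + p, ((n + 1 : Nat) : Int) % 4) := by
        simp only [h, hmod4]
        push_cast
        refine Prod.ext rfl (Prod.ext ?_ ?_) <;> simp
        omega
      simp only [hstep]
      rw [ih (n + 1) x (y + p)]
      simp only [pvGSel_cons, h]
      push_cast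
      refine Prod.ext ?_ (Prod.ext ?_ ?_) <;> simp <;> omega
    · have hstep : ((fun (st : Int × Int × Int) paso =>
          let x := st.1
          let y := st.2.1
          let d := st.2.2
          let xy : Int × Int :=
            if d = 0 then (x, y + paso)
            else if d = 1 then (x - paso, y)
            else if d = 2 then (x, y - paso)
            else if d = 3 then (x + paso, y)
            else (x, y)
          (xy.1, xy.2, PySem.Int.mod (d + 1) 4)) (x, y, (n : Int) % 4) p)
          = (x - p, y, ((n + 1 : Nat) : Int) % 4) := by
        simp only [h, hmod4]
        push_cast
        refine Prod.ext ?_ (Prod.ext ?_ ?_) <;> simp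
        omega
      simp only [hstep]
      rw [ih (n + 1) (x - p) y]
      simp only [pvGSel_cons, h]
      push_cast
      refine Prod.ext ?_ (Prod.ext ?_ ?_) <;> simp <;> omega
    · have hstep : ((fun (st : Int × Int × Int) paso =>
          let x := st.1
          let y := st.2.1
          let d := st.2.2
          let xy : Int × Int :=
            if d = 0 then (x, y + paso)
            else if d = 1 then (x - paso, y)
            else if d = 2 then (x, y - paso)
            else if d = 3 then (x + paso, y)
            else (x, y)
          (xy.1, xy.2, PySem.Int.mod (d + 1) 4)) (x, y, (n : Int) % 4) p)
          = (x, y - p, ((n + 1 : Nat) : Int) % 4) := by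
        simp only [h, hmod4]
        push_cast
        refine Prod.ext ?_ (Prod.ext ?_ ?_) <;> simp
        omega
      simp only [hstep]
      rw [ih (n + 1) x (y - p)]
      simp only [pvGSel_cons, h]
      push_cast
      refine Prod.ext ?_ (Prod.ext ?_ ?_) <;> simp <;> omega
    · have hstep : ((fun (st : Int × Int × Int) paso =>
          let x := st.1
          let y := st.2.1
          let d := st.2.2
          let xy : Int × Int :=
            if d = 0 then (x, y + paso)
            else if d = 1 then (x - paso, y)
            else if d = 2 then (x, y - paso)
            else if d = 3 then (x + paso, y)
            else (x, y)
          (xy.1, xy.2, PySem.Int.mod (d + 1) 4)) (x, y, (n : Int) % 4) p)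
          = (x + p, y, ((n + 1 : Nat) : Int) % 4) := by
        simp only [h, hmod4]
        push_cast
        refine Prod.ext ?_ (Prod.ext ?_ ?_) <;> simp
        omega
      simp only [hstep]
      rw [ih (n + 1) (x + p) y]
      simp only [pvGSel_cons, h]
      push_cast
      refine Prod.ext ?_ (Prod.ext ?_ ?_) <;> simp <;> omega

-- ===== VERDICT (by name: the statement is the Claim_ definition above) =====
theorem calcular_posicion_robot_spec : Claim_equal_calcular_posicion_robot := by
  intro pasos _
  unfold Spec_calcular_posicion_robot calcular_posicion_robot calcular_posicion_robot_alt
  have h0 : (0 : Int) = ((0 : Nat) : Int) % 4 := by norm_num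
  simp only []
  rw [show ((0,0,0) : Int × Int × Int) = ((0 : Int), (0 : Int), ((0 : Nat) : Int) % 4) by norm_num]
  rw [pv_loop_eq pasos 0 0 0]
  have : ∀ t, pvGSel pasos 0 t = pvSumSel pasos t := by
    intro t; rfl
  simp [this]
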